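-- pv_equiv track=rewrite | github.com/Davidprazere/university-vsuet-done | новые работы/9 работа (1).py | find_min_element_row_sum
-- ===== SOURCE A (Python) =====
-- def find_min_element_row_sum(matrix):
--     # Находим индексы минимального элемента
--     min_element_value = float('inf')  # Инициализируем переменную значением бесконечности
--     min_row_index = -1
--     for i in range(len(matrix)):
--         for j in range(len(matrix[i])):
--             if matrix[i][j] < min_element_value:
--                 min_element_value = matrix[i][j]
--                 min_row_index = i
--
--     # Суммируем элементы в найденной строке
--     row_sum = sum(matrix[min_row_index])
--
--     return row_sum
-- ===== SOURCE B (Python) =====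
-- def find_min_element_row_sum(matrix):
--     # Stage 1: flatten and take the global minimum; stage 2: linear search for
--     # the first row containing it; stage 3: sum that row. No elements -> sum 0.
--     flat = [x for row in matrix for x in row]
--     if not flat:
--         return 0
--     m = min(flat)
--     for row in matrix:
--         if m in row:
--             return sum(row)
-- ===== Notes on version B (the rewrite author's own statement) =====
-- stated objective: alternative
-- what changed: B is a three-stage pipeline - flatten the matrix, take the global minimum of the flat list, then search for the first row containing that value by membership and sum it - instead of A's single nested scan that maintains a running (best value, best row index) state.
import Mathlib
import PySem

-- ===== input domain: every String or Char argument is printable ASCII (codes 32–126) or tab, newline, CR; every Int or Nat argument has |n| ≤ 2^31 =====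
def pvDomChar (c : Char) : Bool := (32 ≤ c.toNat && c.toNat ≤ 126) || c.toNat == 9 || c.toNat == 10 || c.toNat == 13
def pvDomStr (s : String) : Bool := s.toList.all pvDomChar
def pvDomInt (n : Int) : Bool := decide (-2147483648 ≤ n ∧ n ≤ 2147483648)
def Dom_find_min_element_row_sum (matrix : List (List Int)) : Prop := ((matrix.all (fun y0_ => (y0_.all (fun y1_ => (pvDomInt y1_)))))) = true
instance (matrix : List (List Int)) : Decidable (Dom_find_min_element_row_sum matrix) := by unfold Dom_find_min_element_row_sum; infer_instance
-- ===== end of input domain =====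

-- B replaces A's stateful nested scan by a staged pipeline (flatten, global min,
-- first row containing it by membership, sum); equal return values proved on
-- nonempty matrices (A raises IndexError on []).

-- ===== PORT A =====
-- `x < best` where best starts as float('inf'): none plays inf, so the test is true on none.
def ltInf (x : Int) (mv : Option Int) : Bool :=
  match mv with
  | none => true
  | some v => decide (x < v)

def find_min_element_row_sum (matrix : List (List Int)) : Int :=
  -- for i in range(len(matrix)): for j in range(len(matrix[i])): update (min_element_value, min_row_index)
  let st :=
    (PySem.List.pyRange 0 (matrix.length : Int) 1).foldl
      (fun (st : Option Int × Int) i =>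
        let row := PySem.List.pyGetD matrix i []
        (PySem.List.pyRange 0 (row.length : Int) 1).foldl
          (fun (st : Option Int × Int) j =>
            let x := PySem.List.pyGetD row j 0
            if ltInf x st.1 then (some x, i) else st)
          st)
      (none, -1)
  -- row_sum = sum(matrix[min_row_index]); Pre_ guarantees the index is in range (pyGet? = some)
  ((PySem.List.pyGet? matrix st.2).getD []).foldl (· + ·) 0

-- ===== PORT B =====
-- for row in matrix: if m in row: return sum(row).  The [] case is Python's loop
-- falling through (returns None); it is unreachable because m = min(flat) lies in some row.
def pvFindRowSum (m : Int) : List (List Int) → Int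
  | [] => 0
  | r :: rs => if m ∈ r then r.foldl (· + ·) 0 else pvFindRowSum m rs

def find_min_element_row_sum_alt (matrix : List (List Int)) : Int :=
  -- flat = [x for row in matrix for x in row]
  let flat := matrix.foldl (fun acc row => acc ++ row) []
  match flat with
  | [] => 0                                   -- if not flat: return 0
  | x :: rest =>
    let m := (PySem.List.min? (x :: rest) (fun y => y)).getD 0   -- m = min(flat)
    pvFindRowSum m matrix

-- ===== PRECONDITION & SPEC =====
-- Python A raises IndexError (sum(matrix[-1])) exactly on the empty matrix; excluded.
def Pre_find_min_element_row_sum (matrix : List (List Int)) : Prop := matrix ≠ []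
instance (matrix : List (List Int)) : Decidable (Pre_find_min_element_row_sum matrix) := by unfold Pre_find_min_element_row_sum; infer_instance
def pvWitness_find_min_element_row_sum : List (List Int) := [[1, 2], [0]]

def Spec_find_min_element_row_sum (matrix : List (List Int)) (out : Int) : Prop := out = find_min_element_row_sum_alt matrix
instance (matrix : List (List Int)) (out : Int) : Decidable (Spec_find_min_element_row_sum matrix out) := by unfold Spec_find_min_element_row_sum; infer_instance

-- ===== CLAIM (what is proved, stated in full; the proofs are below) =====
def Claim_equal_find_min_element_row_sum : Prop := ∀ (matrix : List (List Int)), Dom_find_min_element_row_sum matrix → Pre_find_min_element_row_sum matrix → Spec_find_min_element_row_sum matrix (find_min_element_row_sum matrix)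
-- ===== LEMMAS AND PROOFS =====

-- proof-only helpers: A's outer step after collapsing the inner loop, min of a list,
-- index of the first row containing a value
def stepA (st : Option Int × Int) (p : Int × List Int) : Option Int × Int :=
  match p.2 with
  | [] => st
  | x :: rest =>
    let m := rest.foldl min x
    if ltInf m st.1 then (some m, p.1) else st

def listMin : List Int → Option Int
  | [] => none
  | x :: xs => some (xs.foldl min x)

def firstIdxP (m : Int) : List (Int × List Int) → Int
  | [] => -1
  | (j, r) :: t => if m ∈ r then j else firstIdxP m t

theorem foldl_min_shift (rest : List Int) (a b : Int) :
    rest.foldl min (min a b) = min a (rest.foldl min b) := by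
  induction rest generalizing b with
  | nil => rfl
  | cons y t ih =>
    simp only [List.foldl_cons]
    rw [min_assoc, ih]

theorem mem_foldl_min (rest : List Int) (x : Int) : rest.foldl min x ∈ x :: rest := by
  induction rest generalizing x with
  | nil => simp [List.foldl]
  | cons y t ih =>
    simp only [List.foldl_cons]
    have h := ih (min x y)
    rcases List.mem_cons.1 h with h | h
    · rcases min_choice x y with hm | hm <;> rw [h, hm] <;> simp
    · simp [h]

theorem foldl_min_le_init (t : List Int) (a : Int) : t.foldl min a ≤ a := by
  induction t generalizing a with
  | nil => simp [List.foldl]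
  | cons z t ih => exact le_trans (ih (min a z)) (min_le_left _ _)

theorem foldl_min_le (rest : List Int) (x y : Int) (hy : y ∈ x :: rest) :
    rest.foldl min x ≤ y := by
  induction rest generalizing x with
  | nil =>
    simp only [List.mem_cons, List.not_mem_nil, or_false] at hy
    simp [hy, List.foldl]
  | cons z t ih =>
    simp only [List.foldl_cons]
    rcases List.mem_cons.1 hy with h | h
    · subst h
      exact le_trans (foldl_min_le_init t (min y z)) (min_le_left _ _)
    · rcases List.mem_cons.1 h with h2 | h2
      · subst h2
        exact le_trans (foldl_min_le_init t (min x y)) (min_le_right _ _)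
      · exact ih (min x z) (List.mem_cons.2 (Or.inr h2))

-- A's inner loop over a nonempty row equals one strict-min comparison against min(row).
theorem inner_eq (i : Int) (rest : List Int) (x : Int) (mv : Option Int) (mi : Int) :
    (x :: rest).foldl (fun (st : Option Int × Int) y => if ltInf y st.1 then (some y, i) else st) (mv, mi)
      = if ltInf (rest.foldl min x) mv then (some (rest.foldl min x), i) else (mv, mi) := by
  induction rest generalizing x mv mi with
  | nil => simp [List.foldl]
  | cons y t ih =>
    simp only [List.foldl_cons]
    have hshift : t.foldl min (min x y) = min x (t.foldl min y) := foldl_min_shift t x y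
    by_cases hx : ltInf x mv = true
    · rw [if_pos hx]
      have h2 := ih y (some x) i
      simp only [List.foldl_cons] at h2 ⊢
      rw [h2, hshift]
      cases mv with
      | none =>
        simp only [ltInf, min_def]
        split_ifs <;> simp_all <;> try omega
      | some v =>
        simp only [ltInf, min_def] at hx ⊢
        split_ifs <;> simp_all <;> try omega
    · rw [if_neg hx]
      have h2 := ih y mv mi
      simp only [List.foldl_cons] at h2 ⊢
      rw [h2, hshift]
      cases mv with
      | none => simp [ltInf] at hx
      | some v =>
        simp only [ltInf, min_def] at hx ⊢
        split_ifs <;> simp_all <;> try omega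

theorem foldl_ext {α β : Type} {f g : α → β → α} (h : ∀ a b, f a b = g a b) (l : List β) (init : α) :
    l.foldl f init = l.foldl g init := by
  induction l generalizing init with
  | nil => rfl
  | cons x t ih => simp only [List.foldl_cons, h, ih]

theorem listMin_cons_append (x : Int) (xs ys : List Int) :
    listMin (x :: xs ++ ys) =
      some (match listMin ys with
            | none => xs.foldl min x
            | some My => min (xs.foldl min x) My) := by
  cases ys with
  | nil => simp [listMin]
  | cons e es =>
    simp only [listMin, List.cons_append, List.foldl_append, List.foldl_cons]
    rw [foldl_min_shift]

-- characterization of A's outer fold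
theorem fold_char (ps : List (Int × List Int)) (st : Option Int × Int) :
    ps.foldl stepA st =
      match listMin (ps.flatMap (·.2)) with
      | none => st
      | some M => if ltInf M st.1 then (some M, firstIdxP M ps) else st := by
  induction ps generalizing st with
  | nil => simp [listMin]
  | cons p t ih =>
    obtain ⟨j, r⟩ := p
    cases r with
    | nil =>
      simp only [List.foldl_cons, stepA, List.flatMap_cons, List.nil_append, firstIdxP]
      rw [ih]
      cases h : listMin (t.flatMap (·.2)) with
      | none => rfl
      | some M => simp [List.not_mem_nil]
    | cons x xs =>
      obtain ⟨m, hm⟩ : ∃ m, xs.foldl min x = m := ⟨_, rfl⟩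
      have hmem : m ∈ x :: xs := hm ▸ mem_foldl_min xs x
      have hle : ∀ y ∈ x :: xs, m ≤ y := fun y hy => hm ▸ foldl_min_le xs x y hy
      simp only [List.foldl_cons, List.flatMap_cons]
      rw [listMin_cons_append, ih]
      simp only [stepA, hm]
      cases hMt : listMin (t.flatMap (·.2)) with
      | none =>
        by_cases hc : ltInf m st.1 = true
        · simp [hc, firstIdxP, hmem]
        · simp [hc]
      | some Mt =>
        by_cases hc : ltInf m st.1 = true
        · by_cases h2 : Mt < m
          · have hMin : min m Mt = Mt := by omega
            have hnot : Mt ∉ x :: xs := fun hmem2 => absurd (hle Mt hmem2) (by omega)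
            have hlt : ltInf Mt (some m) = true := by simp [ltInf]; omega
            have hlt2 : ltInf Mt st.1 = true := by
              cases hs : st.1 with
              | none => simp [ltInf]
              | some v => rw [hs] at hc; simp [ltInf] at hc ⊢; omega
            simp [hc, hMin, hlt, hlt2, firstIdxP, hnot]
          · have hMin : min m Mt = m := by omega
            have hlt : ltInf Mt (some m) = false := by simp [ltInf]; omega
            simp [hc, hMin, hlt, firstIdxP, hmem]
        · obtain ⟨v, hv⟩ : ∃ v, st.1 = some v := by
            cases hs : st.1 with
            | none => rw [hs] at hc; simp [ltInf] at hc
            | some v => exact ⟨v, rfl⟩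
          have hvm : v ≤ m := by rw [hv] at hc; simp [ltInf] at hc; omega
          by_cases h2 : Mt < v
          · have hMin : min m Mt = Mt := by omega
            have hnot : Mt ∉ x :: xs := fun hmem2 => absurd (hle Mt hmem2) (by omega)
            have hlt2 : ltInf Mt st.1 = true := by simp [ltInf, hv]; omega
            simp [hc, hMin, hlt2, firstIdxP, hnot]
          · have h3 : ltInf Mt st.1 = false := by simp [ltInf, hv]; omega
            have h4 : ltInf (min m Mt) st.1 = false := by
              simp [ltInf, hv, min_def]; split_ifs <;> omega
            simp [hc, h3, h4]

-- the first row containing M (M a member of some row) gives B's search result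
theorem pick (rows : List (List Int)) (k : Nat) (M : Int) (h : M ∈ rows.flatten) :
    ∃ p : Nat, p < rows.length ∧
      firstIdxP M (PySem.List.enumerate rows (k : Int)) = ((k + p : Nat) : Int) ∧
      (rows.getD p []).foldl (· + ·) 0 = pvFindRowSum M rows := by
  induction rows generalizing k with
  | nil => simp at h
  | cons r rs ih =>
    rw [PySem.List.enumerate_cons]
    by_cases hr : M ∈ r
    · exact ⟨0, by simp, by simp [firstIdxP, hr], by simp [pvFindRowSum, hr]⟩
    · have h2 : M ∈ rs.flatten := by
        simp only [List.flatten_cons, List.mem_append] at h; tauto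
      obtain ⟨p, hp, hidx, hsum⟩ := ih (k + 1) h2
      refine ⟨p + 1, by simpa using Nat.succ_lt_succ hp, ?_, ?_⟩
      · have : ((k : Int) + 1) = ((k + 1 : Nat) : Int) := by push_cast; ring
        simp only [firstIdxP, hr, this, hidx]
        push_cast; ring
      · simpa [pvFindRowSum, hr] using hsum

theorem flatMap_snd_enumerate (rows : List (List Int)) (s : Int) :
    (PySem.List.enumerate rows s).flatMap (·.2) = rows.flatten := by
  induction rows generalizing s with
  | nil => simp [PySem.List.enumerate_nil]
  | cons r rs ih => simp [PySem.List.enumerate_cons, ih]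

theorem foldl_append_eq_flatten (l : List (List Int)) (acc : List Int) :
    l.foldl (fun a r => a ++ r) acc = acc ++ l.flatten := by
  induction l generalizing acc with
  | nil => simp
  | cons r rs ih => simp [ih]

-- A's nested pyRange fold equals the stepA fold over the enumeration
theorem a_fold_eq (matrix : List (List Int)) :
    (PySem.List.pyRange 0 (matrix.length : Int) 1).foldl
      (fun (st : Option Int × Int) i =>
        let row := PySem.List.pyGetD matrix i []
        (PySem.List.pyRange 0 (row.length : Int) 1).foldl
          (fun (st : Option Int × Int) j =>
            let x := PySem.List.pyGetD row j 0
            if ltInf x st.1 then (some x, i) else st)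
          st)
      (none, -1)
      = (PySem.List.enumerate matrix 0).foldl stepA (none, -1) := by
  rw [PySem.List.enumerate_eq_map_pyRange matrix ([] : List Int), List.foldl_map]
  simp only [PySem.List.len_eq]
  apply foldl_ext
  intro st i
  rw [PySem.List.foldl_pyRange_zero_pyGetD' (PySem.List.pyGetD matrix i []) 0
      (fun (st : Option Int × Int) y => if ltInf y st.1 then (some y, i) else st) st]
  cases h : PySem.List.pyGetD matrix i [] with
  | nil => simp [stepA]
  | cons x rest =>
    simp only [stepA]
    obtain ⟨mv, mi⟩ := st
    simpa using inner_eq i rest x mv mi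

-- ===== VERDICT (by name: the statement is the Claim_ definition above) =====
theorem find_min_element_row_sum_spec : Claim_equal_find_min_element_row_sum := by
  intro matrix _hdom hpre
  unfold Spec_find_min_element_row_sum find_min_element_row_sum find_min_element_row_sum_alt
  simp only []
  rw [a_fold_eq, fold_char, flatMap_snd_enumerate, foldl_append_eq_flatten, List.nil_append]
  cases hf : matrix.flatten with
  | nil =>
    -- every row is empty: A sums the (empty) last row, B returns 0
    have hall : ∀ r ∈ matrix, r = [] := List.flatten_eq_nil_iff.1 hf
    cases hl : matrix.getLast? with
    | none => exact absurd (List.getLast?_eq_none_iff.1 hl) hpre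
    | some r =>
      have hr : r = [] := hall r (List.mem_of_getLast? hl)
      simp [listMin, PySem.List.pyGet?_neg_one, hl, hr]
  | cons x rest =>
    have hmem : (rest.foldl min x) ∈ matrix.flatten := by
      rw [hf]; exact mem_foldl_min rest x
    obtain ⟨p, hp, hidx, hsum⟩ := pick matrix 0 (rest.foldl min x) hmem
    simp only [Nat.cast_zero, Nat.zero_add] at hidx
    simp only [listMin, ltInf, if_pos]
    rw [hidx]
    simp only [PySem.List.pyGet?_natCast, PySem.List.min?_id_cons]
    rw [List.getElem?_eq_getElem hp]
    simpa [List.getD, List.getElem?_eq_getElem hp] using hsum
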